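-- pv_equiv track=rewrite | github.com/CJKinni/advent-of-code | 2023/13/main.py | find_horizontal_reflection
-- ===== SOURCE A (Python) =====
-- def find_horizontal_reflection(pattern, desired_reflection_count=0):
--     rows = len(pattern)
--     cols = len(pattern[0])
--
--     for row in range(1, rows):
--         max_elements_to_check = min(row, rows - row)
--
--         exception_count = 0
--         for col in range(cols):
--             if not all(pattern[row - i - 1][col] == pattern[row + i][col] for i in range(max_elements_to_check)):
--                 exception_count += 1
--                 if exception_count > desired_reflection_count:
--                     break
--
--         if exception_count == desired_reflection_count:
--             return row - 1
--
--     return None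
-- ===== SOURCE B (Python) =====
-- def find_horizontal_reflection(pattern, desired_reflection_count=0):
--     rows = len(pattern)
--     cols = len(pattern[0])
--     memo = {}
--
--     def diffcols(a, b):
--         key = (a, b)
--         if key not in memo:
--             memo[key] = frozenset(c for c in range(cols) if a[c] != b[c])
--         return memo[key]
--
--     for r in range(1, rows):
--         m = min(r, rows - r)
--         bad = set()
--         for i in range(m):
--             bad |= diffcols(pattern[r - i - 1], pattern[r + i])
--         if len(bad) == desired_reflection_count:
--             return r - 1
--     return None
-- ===== Notes on version B (the rewrite author's own statement) =====
-- stated objective: alternative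
-- what changed: B views each candidate split through its mirrored ROW PAIRS instead of A's per-column scans: it computes the set of differing columns for each mirrored row pair (memoized in a dict keyed by the pair of row strings, so repeated rows never rescan characters), unions those sets, and compares the union's size, replacing A's per-column capped counter with early break.
-- outside the precondition, e.g. on find_horizontal_reflection(['ab', 'c'], 0): A returns None, B raises IndexError
import Mathlib
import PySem

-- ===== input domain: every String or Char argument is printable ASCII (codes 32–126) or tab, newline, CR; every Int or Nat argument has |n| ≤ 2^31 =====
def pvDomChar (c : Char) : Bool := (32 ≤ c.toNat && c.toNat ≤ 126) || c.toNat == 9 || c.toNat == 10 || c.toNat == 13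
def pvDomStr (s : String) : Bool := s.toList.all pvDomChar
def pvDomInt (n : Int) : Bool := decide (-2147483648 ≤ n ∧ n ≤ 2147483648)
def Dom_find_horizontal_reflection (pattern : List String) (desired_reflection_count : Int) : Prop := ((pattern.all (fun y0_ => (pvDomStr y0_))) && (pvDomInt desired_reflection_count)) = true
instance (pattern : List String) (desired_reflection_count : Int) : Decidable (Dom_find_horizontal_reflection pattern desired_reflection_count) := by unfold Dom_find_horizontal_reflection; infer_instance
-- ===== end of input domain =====

-- B replaces A's per-column mirror scans (counter + early break) with a row-pair view:
-- for each candidate split it unions the sets of differing columns of the mirrored row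
-- PAIRS, those sets memoized in a dict keyed by the row-string pair, and compares the
-- union's size; same asymptotic cost, a different decomposition (alternative).

-- ===== PORT A =====
-- pattern[r][c]; exact under Pre_ (both indices in range there, so the defaults are never used)
def pvChar (pattern : List String) (r c : Nat) : Char :=
  ((pattern.getD r "").toList).getD c ' '

-- all(pattern[row - i - 1][col] == pattern[row + i][col] for i in range(m))
def aColGood (pattern : List String) (row m c : Nat) : Bool :=
  (List.range m).all (fun i => pvChar pattern (row - i - 1) c == pvChar pattern (row + i) c)

-- the inner `for col in range(cols)` loop with its exception_count and break
def aInner (pattern : List String) (row m : Nat) (d : Int) : List Nat → Int → Int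
  | [], cnt => cnt
  | c :: cs, cnt =>
      if aColGood pattern row m c then aInner pattern row m d cs cnt
      else if d < cnt + 1 then cnt + 1 else aInner pattern row m d cs (cnt + 1)

-- the outer `for row in range(1, rows)` loop with its early return
def aOuter (pattern : List String) (rows cols : Nat) (d : Int) : List Nat → Option Int
  | [] => none
  | r :: rs =>
      let m := min r (rows - r)
      if aInner pattern r m d (List.range cols) 0 = d then some ((r : Int) - 1)
      else aOuter pattern rows cols d rs

def find_horizontal_reflection (pattern : List String) (desired_reflection_count : Int) : Option Int :=
  let rows := pattern.length
  let cols := (pattern.headD "").toList.length   -- len(pattern[0]); raises on [] → excluded by Pre_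
  aOuter pattern rows cols desired_reflection_count (List.range' 1 (rows - 1))

-- ===== PORT B =====
-- frozenset(c for c in range(cols) if a[c] != b[c])  (a[c] exact under Pre_: no row shorter than cols)
def bDiff (cols : Nat) (a b : String) : PySem.Set Nat :=
  PySem.Set.ofList ((List.range cols).filter
    (fun c => !(a.toList.getD c ' ' == b.toList.getD c ' ')))

-- diffcols(a, b): look the pair up in the memo dict; on a miss compute and insert
def bLookup (cols : Nat) (memo : PySem.Dict (String × String) (List Nat)) (a b : String) :
    PySem.Dict (String × String) (List Nat) × List Nat :=
  match memo.get? (a, b) with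
  | some v => (memo, v)
  | none => let v := bDiff cols a b; (memo.insert (a, b) v, v)

-- the `for i in range(m)` loop: bad |= diffcols(pattern[r-i-1], pattern[r+i])
def bInner (pattern : List String) (cols r : Nat) :
    List Nat → PySem.Dict (String × String) (List Nat) → PySem.Set Nat →
    PySem.Dict (String × String) (List Nat) × PySem.Set Nat
  | [], memo, bad => (memo, bad)
  | i :: is, memo, bad =>
      let p := bLookup cols memo (pattern.getD (r - i - 1) "") (pattern.getD (r + i) "")
      bInner pattern cols r is p.1 (PySem.Set.union bad p.2)

-- the `for r in range(1, rows)` loop, threading the memo dict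
def bOuter (pattern : List String) (rows cols : Nat) (d : Int) :
    List Nat → PySem.Dict (String × String) (List Nat) → Option Int
  | [], _ => none
  | r :: rs, memo =>
      let m := min r (rows - r)
      let p := bInner pattern cols r (List.range m) memo PySem.Set.empty
      if ((p.2.length : Int)) = d then some ((r : Int) - 1)
      else bOuter pattern rows cols d rs p.1

def find_horizontal_reflection_alt (pattern : List String) (desired_reflection_count : Int) : Option Int :=
  let rows := pattern.length
  let cols := (pattern.headD "").toList.length
  bOuter pattern rows cols desired_reflection_count (List.range' 1 (rows - 1)) PySem.Dict.empty

-- ===== PRECONDITION & SPEC =====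
-- Pre_ excludes the empty pattern (pattern[0] raises IndexError) and patterns with a row
-- shorter than the first row, on which A's per-cell indexing raises IndexError except when
-- an early break happens to skip the short row (there B raises inside diffcols).
def Pre_find_horizontal_reflection (pattern : List String) (desired_reflection_count : Int) : Prop :=
  pattern ≠ [] ∧ ∀ s ∈ pattern, (pattern.headD "").toList.length ≤ s.toList.length
instance (pattern : List String) (desired_reflection_count : Int) : Decidable (Pre_find_horizontal_reflection pattern desired_reflection_count) := by unfold Pre_find_horizontal_reflection; infer_instance

def pvWitness_find_horizontal_reflection : List String × Int := (["#.", "#.", "##"], 0)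

def Spec_find_horizontal_reflection (pattern : List String) (desired_reflection_count : Int) (out : Option Int) : Prop := out = find_horizontal_reflection_alt pattern desired_reflection_count
instance (pattern : List String) (desired_reflection_count : Int) (out : Option Int) : Decidable (Spec_find_horizontal_reflection pattern desired_reflection_count out) := by unfold Spec_find_horizontal_reflection; infer_instance

-- ===== CLAIM (what is proved, stated in full; the proofs are below) =====
def Claim_equal_find_horizontal_reflection : Prop := ∀ (pattern : List String) (desired_reflection_count : Int), Dom_find_horizontal_reflection pattern desired_reflection_count → Pre_find_horizontal_reflection pattern desired_reflection_count → Spec_find_horizontal_reflection pattern desired_reflection_count (find_horizontal_reflection pattern desired_reflection_count)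

-- ===== LEMMAS AND PROOFS =====

-- the memo dict only ever holds the sets diffcols computes
def MemoOK (cols : Nat) (memo : PySem.Dict (String × String) (List Nat)) : Prop :=
  ∀ k v, memo.get? k = some v → v = bDiff cols k.1 k.2

lemma memoOK_empty (cols : Nat) : MemoOK cols PySem.Dict.empty := by
  intro k v h; simp [PySem.Dict.get?_empty] at h

lemma bLookup_spec (cols : Nat) (memo : PySem.Dict (String × String) (List Nat))
    (a b : String) (h : MemoOK cols memo) :
    (bLookup cols memo a b).2 = bDiff cols a b ∧ MemoOK cols (bLookup cols memo a b).1 := by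
  unfold bLookup
  cases hg : memo.get? (a, b) with
  | some v => exact ⟨h (a, b) v hg, h⟩
  | none =>
      refine ⟨rfl, ?_⟩
      intro k v hk
      by_cases hkk : k = (a, b)
      · subst hkk
        rw [PySem.Dict.get?_insert_self] at hk
        exact (Option.some.inj hk).symm
      · rw [PySem.Dict.get?_insert_of_ne _ _ hkk] at hk
        exact h k v hk

lemma mem_bDiff (cols : Nat) (a b : String) (c : Nat) :
    c ∈ bDiff cols a b ↔ c < cols ∧ a.toList.getD c ' ' ≠ b.toList.getD c ' ' := by
  simp [bDiff, PySem.Set.mem_ofList, List.mem_filter, List.mem_range]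

-- what the inner union loop accumulates
lemma bInner_spec (pattern : List String) (cols r : Nat) :
    ∀ (is : List Nat) (memo : PySem.Dict (String × String) (List Nat)) (bad : PySem.Set Nat),
      MemoOK cols memo → bad.Nodup →
      (MemoOK cols (bInner pattern cols r is memo bad).1 ∧
       (bInner pattern cols r is memo bad).2.Nodup ∧
       ∀ c, c ∈ (bInner pattern cols r is memo bad).2 ↔
         (c ∈ bad ∨ ∃ i ∈ is, c ∈ bDiff cols (pattern.getD (r - i - 1) "") (pattern.getD (r + i) ""))) := by
  intro is
  induction is with
  | nil => intro memo bad hm hb; exact ⟨hm, hb, by simp [bInner]⟩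
  | cons i is ih =>
      intro memo bad hm hb
      obtain ⟨hv, hm'⟩ := bLookup_spec cols memo (pattern.getD (r - i - 1) "") (pattern.getD (r + i) "") hm
      have hb' : (PySem.Set.union bad (bLookup cols memo (pattern.getD (r - i - 1) "") (pattern.getD (r + i) "")).2).Nodup :=
        PySem.Set.nodup_union _ _ hb
      obtain ⟨h1, h2, h3⟩ := ih _ _ hm' hb'
      refine ⟨h1, h2, ?_⟩
      intro c
      rw [show bInner pattern cols r (i :: is) memo bad
            = bInner pattern cols r is
                (bLookup cols memo (pattern.getD (r - i - 1) "") (pattern.getD (r + i) "")).1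
                (PySem.Set.union bad (bLookup cols memo (pattern.getD (r - i - 1) "") (pattern.getD (r + i) "")).2) from rfl]
      rw [h3 c, PySem.Set.mem_union, hv]
      constructor
      · rintro ((h | h) | ⟨j, hj, hc⟩)
        · exact Or.inl h
        · exact Or.inr ⟨i, by simp, h⟩
        · exact Or.inr ⟨j, by simp [hj], hc⟩
      · rintro (h | ⟨j, hj, hc⟩)
        · exact Or.inl (Or.inl h)
        · rcases List.mem_cons.mp hj with h | h
          · subst h; exact Or.inl (Or.inr hc)
          · exact Or.inr ⟨j, h, hc⟩

-- a nodup set of columns below cols has as many elements as range cols has members of it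
lemma length_eq_countP (cols : Nat) (S : List Nat) (hnd : S.Nodup)
    (hsub : ∀ c ∈ S, c < cols) :
    ((List.range cols).countP (fun c => decide (c ∈ S)) : Int) = (S.length : Int) := by
  have hperm : List.Perm ((List.range cols).filter (fun c => decide (c ∈ S))) S := by
    rw [List.perm_ext_iff_of_nodup (List.Nodup.filter _ (List.nodup_range)) hnd]
    intro c
    simp only [List.mem_filter, List.mem_range, decide_eq_true_eq]
    exact ⟨fun h => h.2, fun h => ⟨hsub c h, h⟩⟩
  rw [List.countP_eq_length_filter, hperm.length_eq]

-- A's capped inner count hits d exactly when the exact bad-column count does.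
lemma aInner_eq_iff (pattern : List String) (row m : Nat) (d : Int) :
    ∀ (l : List Nat) (cnt : Int),
      (aInner pattern row m d l cnt = d ↔
        cnt + (l.countP (fun c => !aColGood pattern row m c) : Int) = d) := by
  intro l
  induction l with
  | nil => intro cnt; simp [aInner]
  | cons c cs ih =>
      intro cnt
      by_cases hg : aColGood pattern row m c
      · have hpc : (if (!aColGood pattern row m c) = true then 1 else 0) = 0 := by simp [hg]
        rw [List.countP_cons, hpc]
        simpa [aInner, hg] using ih cnt
      · have hunf : aInner pattern row m d (c :: cs) cnt
            = if d < cnt + 1 then cnt + 1 else aInner pattern row m d cs (cnt + 1) := by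
          simp [aInner, hg]
        have hpc : (if (!aColGood pattern row m c) = true then 1 else 0) = 1 := by simp [hg]
        rw [hunf, List.countP_cons, hpc]
        by_cases hd : d < cnt + 1
        · rw [if_pos hd]
          constructor <;> intro hh <;> omega
        · rw [if_neg hd, ih (cnt + 1)]
          omega

-- at one split row, A's capped-counter condition equals B's union-size condition
lemma cond_eq (pattern : List String) (cols r m : Nat) (d : Int)
    (memo : PySem.Dict (String × String) (List Nat)) (hm : MemoOK cols memo) :
    (aInner pattern r m d (List.range cols) 0 = d ↔
      (((bInner pattern cols r (List.range m) memo PySem.Set.empty).2.length : Int)) = d) ∧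
    MemoOK cols (bInner pattern cols r (List.range m) memo PySem.Set.empty).1 := by
  obtain ⟨hm', hnd, hmem⟩ :=
    bInner_spec pattern cols r (List.range m) memo PySem.Set.empty hm List.nodup_nil
  set S := (bInner pattern cols r (List.range m) memo PySem.Set.empty).2 with hS
  have hmemS : ∀ c, c ∈ S ↔ ∃ i, i < m ∧ c < cols ∧
      pvChar pattern (r - i - 1) c ≠ pvChar pattern (r + i) c := by
    intro c
    rw [hmem c]
    simp only [PySem.Set.empty, List.not_mem_nil, false_or, List.mem_range, mem_bDiff, pvChar]
  have hsub : ∀ c ∈ S, c < cols := by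
    intro c hc; obtain ⟨i, _, hlt, _⟩ := (hmemS c).mp hc; exact hlt
  have hcong : (List.range cols).countP (fun c => !aColGood pattern r m c)
      = (List.range cols).countP (fun c => decide (c ∈ S)) := by
    apply List.countP_congr
    intro c hc
    rw [List.mem_range] at hc
    simp only [Bool.not_eq_eq_eq_not, Bool.not_true, decide_eq_true_eq]
    rw [hmemS c]
    simp only [aColGood, List.all_eq_false, List.mem_range]
    constructor
    · rintro ⟨i, hi, hne⟩; exact ⟨i, hi, hc, by simpa using hne⟩
    · rintro ⟨i, hi, _, hne⟩; exact ⟨i, hi, by simpa using hne⟩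
  refine ⟨?_, hm'⟩
  rw [aInner_eq_iff, hcong, length_eq_countP cols S hnd hsub]
  omega

-- the two outer loops agree on any list of candidate split rows, for any valid memo
lemma outer_eq (pattern : List String) (cols : Nat) (d : Int) :
    ∀ (rs : List Nat) (memo : PySem.Dict (String × String) (List Nat)), MemoOK cols memo →
      aOuter pattern pattern.length cols d rs = bOuter pattern pattern.length cols d rs memo := by
  intro rs
  induction rs with
  | nil => intro memo _; rfl
  | cons r rs ih =>
      intro memo hm
      obtain ⟨hiff, hm'⟩ := cond_eq pattern cols r (min r (pattern.length - r)) d memo hm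
      simp only [aOuter, bOuter]
      rw [if_congr hiff rfl rfl]
      split
      · rfl
      · exact ih _ hm'

-- ===== VERDICT (by name: the statement is the Claim_ definition above) =====
theorem find_horizontal_reflection_spec : Claim_equal_find_horizontal_reflection := by
  intro pattern d _ _
  unfold Spec_find_horizontal_reflection find_horizontal_reflection find_horizontal_reflection_alt
  exact outer_eq pattern ((pattern.headD "").toList.length) d
    (List.range' 1 (pattern.length - 1)) PySem.Dict.empty
    (memoOK_empty _)
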